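-- pv_equiv track=rewrite | github.com/080user080/styletts2-ukrainian | app_Full_book.py | split_to_parts
-- ===== SOURCE A (Python) =====
-- def split_to_parts(text, max_chars=49000):
--     split_symbols = '.?!:'
--     parts = []
--     buffer = ""
--
--     for char in text:
--         buffer += char
--         if char in split_symbols and len(buffer) >= max_chars:
--             parts.append(buffer.strip())
--             buffer = ""
--
--     if buffer.strip():
--         parts.append(buffer.strip())
--
--     return parts
-- ===== SOURCE B (Python) =====
-- def split_to_parts(text, max_chars=49000):
--     boundaries = [i for i, ch in enumerate(text) if ch in '.?!:']
--     parts = []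
--     start = 0
--     for i in boundaries:
--         if i + 1 - start >= max_chars:
--             parts.append(text[start:i + 1].strip())
--             start = i + 1
--     tail = text[start:].strip()
--     if tail:
--         parts.append(tail)
--     return parts
-- ===== Notes on version B (the rewrite author's own statement) =====
-- stated objective: alternative
-- what changed: B first collects the indices of all split characters, then folds over these boundary indices maintaining a start offset and slicing the text, instead of A's per-character loop that grows a buffer string one character at a time.
import Mathlib
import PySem

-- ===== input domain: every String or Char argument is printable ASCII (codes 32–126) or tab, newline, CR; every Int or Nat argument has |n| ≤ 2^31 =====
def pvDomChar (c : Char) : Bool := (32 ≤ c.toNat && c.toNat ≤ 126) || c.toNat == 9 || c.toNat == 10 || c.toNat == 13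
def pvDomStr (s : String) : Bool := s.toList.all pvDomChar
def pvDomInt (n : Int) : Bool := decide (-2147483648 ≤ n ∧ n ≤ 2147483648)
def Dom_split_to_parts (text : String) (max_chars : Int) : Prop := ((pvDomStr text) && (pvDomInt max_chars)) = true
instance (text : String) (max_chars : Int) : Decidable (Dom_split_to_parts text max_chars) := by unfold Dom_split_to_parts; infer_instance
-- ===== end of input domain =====

-- B collects the boundary indices of split characters first, then folds over them with a start
-- offset and slices the text, instead of A's per-character buffer accumulation (objective: alternative).


-- ===== PORT A =====
-- A: for char in text: buffer += char; if char in '.?!:' and len(buffer) >= max_chars: append strip, reset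
def split_to_parts (text : String) (max_chars : Int) : List String :=
  let split_symbols : List Char := ['.', '?', '!', ':']
  let st := text.toList.foldl
    (fun (st : List String × List Char) char =>
      let buffer := st.2 ++ [char]
      if char ∈ split_symbols ∧ max_chars ≤ (buffer.length : Int) then
        (st.1 ++ [String.ofList (PySem.Chars.strip buffer)], [])
      else
        (st.1, buffer))
    ([], [])
  if PySem.Chars.strip st.2 ≠ [] then st.1 ++ [String.ofList (PySem.Chars.strip st.2)] else st.1

-- ===== PORT B =====
-- B: boundaries = indices of the split chars; fold over them with a start offset, slicing the text
def split_to_parts_alt (text : String) (max_chars : Int) : List String :=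
  let l := text.toList
  let boundaries := ((PySem.List.enumerate l 0).filter
      (fun p => decide (p.2 ∈ ['.', '?', '!', ':']))).map (·.1)
  let st := boundaries.foldl
    (fun (st : List String × Int) i =>
      if max_chars ≤ i + 1 - st.2 then
        (st.1 ++ [String.ofList (PySem.Chars.strip (PySem.List.slice l (some st.2) (some (i + 1))))], i + 1)
      else st)
    ([], 0)
  let tail := PySem.Chars.strip (PySem.List.slice l (some st.2) none)
  if tail ≠ [] then st.1 ++ [String.ofList tail] else st.1

-- ===== PRECONDITION & SPEC =====
def Spec_split_to_parts (text : String) (max_chars : Int) (out : List String) : Prop := out = split_to_parts_alt text max_chars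
instance (text : String) (max_chars : Int) (out : List String) : Decidable (Spec_split_to_parts text max_chars out) := by unfold Spec_split_to_parts; infer_instance

-- ===== CLAIM (what is proved, stated in full; the proofs are below) =====
def Claim_equal_split_to_parts : Prop := ∀ (text : String) (max_chars : Int), Dom_split_to_parts text max_chars → Spec_split_to_parts text max_chars (split_to_parts text max_chars)

-- ===== LEMMAS AND PROOFS =====

-- boundary indices (as B computes them) of the suffix starting at position p
def pvIdxs : List Char → Int → List Int
  | [], _ => []
  | c :: cs, p => if c = '.' ∨ c = '?' ∨ c = '!' ∨ c = ':' then p :: pvIdxs cs (p + 1) else pvIdxs cs (p + 1)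

lemma pvIdxs_eq (cs : List Char) (p : Int) :
    ((PySem.List.enumerate cs p).filter (fun q => decide (q.2 ∈ ['.', '?', '!', ':']))).map (·.1)
      = pvIdxs cs p := by
  induction cs generalizing p with
  | nil => simp [pvIdxs, PySem.List.enumerate_nil]
  | cons c cs ih =>
    rw [PySem.List.enumerate_cons]
    by_cases h : c = '.' ∨ c = '?' ∨ c = '!' ∨ c = ':' <;>
      · simp [pvIdxs, h]
        simpa using ih (p + 1)

-- the segment l[start:p) — A's buffer contents once the first p characters are processed
def pvSeg (l : List Char) (start p : Nat) : List Char := (l.take p).drop start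

lemma pvSeg_snoc (l : List Char) (start p : Nat) (hs : start ≤ p) (hp : p < l.length) :
    pvSeg l start (p + 1) = pvSeg l start p ++ [l[p]] := by
  unfold pvSeg
  rw [List.take_succ_eq_append_getElem hp, List.drop_append_of_le_length (by simp; omega)]

lemma pvSeg_len (l : List Char) (start p : Nat) (hs : start ≤ p) (hp : p ≤ l.length) :
    (pvSeg l start p).length = p - start := by
  simp [pvSeg]; omega

lemma pvSeg_slice (l : List Char) (start p : Nat) :
    PySem.List.slice l (some (start : Int)) (some (p : Int)) = pvSeg l start p := by
  rw [PySem.List.slice_natCast, pvSeg, List.drop_take]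

-- A's loop body, finalization; B's loop body (over the full list l), finalization
def pvStepA (max_chars : Int) (st : List String × List Char) (char : Char) : List String × List Char :=
  let buffer := st.2 ++ [char]
  if char ∈ (['.', '?', '!', ':'] : List Char) ∧ max_chars ≤ (buffer.length : Int) then
    (st.1 ++ [String.ofList (PySem.Chars.strip buffer)], [])
  else
    (st.1, buffer)

def pvFinA (st : List String × List Char) : List String :=
  if PySem.Chars.strip st.2 ≠ [] then st.1 ++ [String.ofList (PySem.Chars.strip st.2)] else st.1

def pvStepB (l : List Char) (max_chars : Int) (st : List String × Int) (i : Int) : List String × Int :=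
  if max_chars ≤ i + 1 - st.2 then
    (st.1 ++ [String.ofList (PySem.Chars.strip (PySem.List.slice l (some st.2) (some (i + 1))))], i + 1)
  else st

def pvFinB (l : List Char) (st : List String × Int) : List String :=
  let tail := PySem.Chars.strip (PySem.List.slice l (some st.2) none)
  if tail ≠ [] then st.1 ++ [String.ofList tail] else st.1

lemma pvCore (l : List Char) (max_chars : Int) :
    ∀ (cs : List Char) (p start : Nat) (parts : List String),
      l.drop p = cs → start ≤ p →
      pvFinA (cs.foldl (pvStepA max_chars) (parts, pvSeg l start p))
        = pvFinB l ((pvIdxs cs p).foldl (pvStepB l max_chars) (parts, (start : Int))) := by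
  intro cs
  induction cs with
  | nil =>
    intro p start parts hdrop hs
    have hp : l.length ≤ p := List.drop_eq_nil_iff.mp hdrop
    simp only [List.foldl_nil, pvIdxs, pvFinA, pvFinB]
    rw [PySem.List.slice_from_natCast]
    have : pvSeg l start p = l.drop start := by
      unfold pvSeg; rw [List.take_of_length_le hp]
    rw [this]
  | cons c cs ih =>
    intro p start parts hdrop hs
    have hp : p < l.length := by
      by_contra h
      rw [List.drop_eq_nil_of_le (by omega)] at hdrop
      simp at hdrop
    have hcons := List.drop_eq_getElem_cons hp
    rw [hdrop] at hcons
    have hc : l[p] = c := (List.cons.injEq .. ▸ hcons).1.symm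
    have hdrop' : l.drop (p + 1) = cs := ((List.cons.injEq .. ▸ hcons).2).symm
    have hsnoc : pvSeg l start p ++ [c] = pvSeg l start (p + 1) := by
      rw [pvSeg_snoc l start p hs hp, hc]
    have hlen : ((pvSeg l start (p + 1)).length : Int) = (p : Int) + 1 - (start : Int) := by
      rw [pvSeg_len l start (p + 1) (by omega) (by omega)]; omega
    simp only [List.foldl_cons, pvIdxs, pvStepA, hsnoc, hlen]
    by_cases hm : c = '.' ∨ c = '?' ∨ c = '!' ∨ c = ':'
    · rw [if_pos hm, List.foldl_cons]
      by_cases hcond : max_chars ≤ (p : Int) + 1 - (start : Int)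
      · have hmem : c ∈ (['.', '?', '!', ':'] : List Char) := by simp [hm]
        rw [if_pos ⟨hmem, hcond⟩]
        unfold pvStepB
        rw [if_pos hcond]
        have hslice : PySem.List.slice l (some (start : Int)) (some ((p : Int) + 1)) = pvSeg l start (p + 1) := by
          have : (p : Int) + 1 = ((p + 1 : Nat) : Int) := by omega
          rw [this, pvSeg_slice]
        rw [hslice]
        have hstart' : (p : Int) + 1 = ((p + 1 : Nat) : Int) := by omega
        rw [hstart']
        have hempty : ([] : List Char) = pvSeg l (p + 1) (p + 1) := by
          unfold pvSeg; rw [List.drop_eq_nil_of_le (by simp)]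
        rw [hempty]
        exact ih (p + 1) (p + 1) _ hdrop' (le_refl _)
      · have : ¬ (c ∈ (['.', '?', '!', ':'] : List Char) ∧ max_chars ≤ (p : Int) + 1 - (start : Int)) := by
          intro ⟨_, h2⟩; exact hcond h2
        rw [if_neg this]
        unfold pvStepB
        rw [if_neg hcond]
        exact ih (p + 1) start parts hdrop' (by omega)
    · have hmem : c ∉ (['.', '?', '!', ':'] : List Char) := by simpa using hm
      rw [if_neg hm, if_neg (by intro ⟨h1, _⟩; exact hmem h1)]
      exact ih (p + 1) start parts hdrop' (by omega)

-- ===== VERDICT (by name: the statement is the Claim_ definition above) =====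
theorem split_to_parts_spec : Claim_equal_split_to_parts := by
  intro text max_chars _
  show pvFinA (text.toList.foldl (pvStepA max_chars) ([], [])) =
    pvFinB text.toList
      ((((PySem.List.enumerate text.toList 0).filter
          (fun p => decide (p.2 ∈ ['.', '?', '!', ':']))).map (·.1)).foldl
        (pvStepB text.toList max_chars) ([], 0))
  rw [pvIdxs_eq]
  have hseg : pvSeg text.toList 0 0 = [] := by simp [pvSeg]
  have h := pvCore text.toList max_chars text.toList 0 0 [] (by simp) (le_refl 0)
  rw [hseg] at h
  exact h
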